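-- pv_equiv track=rewrite | github.com/Vernilnat/Making_a_game | main.py | mergecheck
-- ===== SOURCE A (Python) =====
-- def mergecheck(grid):
--     prev_num = None
--     can_merge = False
--     for i in grid:
--         if can_merge:
--             break
--         for j in i:
--             if j == prev_num:
--                 can_merge = True
--                 break
--             prev_num = j
--         prev_num = None
--     return can_merge
-- ===== SOURCE B (Python) =====
-- def mergecheck(grid):
--     def compress(row):
--         runs = []
--         for x in row:
--             if not runs or runs[-1] != x:
--                 runs.append(x)
--         return runs
--     return any(len(compress(row)) != len(row) for row in grid)
-- ===== Notes on version B (the rewrite author's own statement) =====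
-- stated objective: alternative
-- what changed: Replaced A's stateful short-circuiting scan (prev_num accumulator, can_merge flag, breaks) by run-length compression: each row is compressed to its list of runs and a merge exists iff the compressed length differs from the row length.
import Mathlib
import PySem

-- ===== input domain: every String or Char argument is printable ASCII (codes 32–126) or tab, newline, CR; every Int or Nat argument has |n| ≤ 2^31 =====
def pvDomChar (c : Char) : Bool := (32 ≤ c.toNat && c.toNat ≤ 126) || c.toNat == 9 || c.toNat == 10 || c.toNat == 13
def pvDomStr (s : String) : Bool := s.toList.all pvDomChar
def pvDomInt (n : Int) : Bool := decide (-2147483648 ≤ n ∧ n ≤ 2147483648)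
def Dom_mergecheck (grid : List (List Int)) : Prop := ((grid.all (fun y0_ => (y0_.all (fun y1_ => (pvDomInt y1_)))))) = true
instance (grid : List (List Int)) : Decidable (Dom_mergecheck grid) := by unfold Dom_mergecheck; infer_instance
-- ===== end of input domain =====

-- B replaces A's stateful short-circuiting scan (prev_num accumulator, can_merge flag, breaks)
-- by run-length compression: a row can merge iff its list of runs is shorter than the row. Objective: alternative.

-- ===== PORT A =====
-- inner 'for j in i' loop: prev_num threaded as Option Int, break on equality
def mergecheckRow (prev : Option Int) (row : List Int) : Bool :=
  match row with
  | [] => false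
  | j :: rest => if some j == prev then true else mergecheckRow (some j) rest

-- outer 'for i in grid' loop carrying can_merge; 'if can_merge: break'
def mergecheckLoop (grid : List (List Int)) (can_merge : Bool) : Bool :=
  match grid with
  | [] => can_merge
  | i :: rest => if can_merge then can_merge else mergecheckLoop rest (mergecheckRow none i)

def mergecheck (grid : List (List Int)) : Bool := mergecheckLoop grid false

-- ===== PORT B =====
-- 'compress': the loop appending x to runs unless runs[-1] == x (runs[-1] = getLast?)
def compressStep (runs : List Int) (x : Int) : List Int :=
  if runs.isEmpty || runs.getLast? != some x then runs ++ [x] else runs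

def compress (row : List Int) : List Int := row.foldl compressStep []

def mergecheck_alt (grid : List (List Int)) : Bool :=
  grid.any (fun row => (compress row).length != row.length)

-- ===== PRECONDITION & SPEC =====
def Spec_mergecheck (grid : List (List Int)) (out : Bool) : Prop := out = mergecheck_alt grid
instance (grid : List (List Int)) (out : Bool) : Decidable (Spec_mergecheck grid out) := by unfold Spec_mergecheck; infer_instance

-- ===== CLAIM (what is proved, stated in full; the proofs are below) =====
def Claim_equal_mergecheck : Prop := ∀ (grid : List (List Int)), Dom_mergecheck grid → Spec_mergecheck grid (mergecheck grid)

-- ===== LEMMAS AND PROOFS =====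
lemma compress_length_le (l : List Int) (out : List Int) :
    (List.foldl compressStep out l).length ≤ out.length + l.length := by
  induction l generalizing out with
  | nil => simp
  | cons x rest ih =>
      simp only [List.foldl_cons]
      calc (List.foldl compressStep (compressStep out x) rest).length
          ≤ (compressStep out x).length + rest.length := ih _
        _ ≤ out.length + (x :: rest).length := by
            unfold compressStep; split_ifs <;> simp <;> omega

lemma compress_key (l : List Int) (out : List Int) (p : Int) (h : out.getLast? = some p) :
    ((List.foldl compressStep out l).length = out.length + l.length)
      ↔ mergecheckRow (some p) l = false := by
  induction l generalizing out p with
  | nil => simp [mergecheckRow]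
  | cons j rest ih =>
      have hne : out ≠ [] := by intro hh; simp [hh] at h
      by_cases hj : j = p
      · have hstep : compressStep out j = out := by
          unfold compressStep
          simp [List.isEmpty_iff, hne, h, hj]
        rw [List.foldl_cons, hstep]
        simp only [mergecheckRow]
        rw [if_pos (by simp [hj])]
        have hb := compress_length_le rest out
        simp only [List.length_cons]
        constructor
        · intro he; exfalso; omega
        · intro hf; simp at hf
      · have hstep : compressStep out j = out ++ [j] := by
          unfold compressStep
          simp [h]
          exact fun _ hpj => hj hpj.symm
        have h2 : (out ++ [j]).getLast? = some j := by simp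
        rw [List.foldl_cons, hstep]
        rw [show out.length + (j :: rest).length = (out ++ [j]).length + rest.length by
          simp; omega]
        rw [ih (out ++ [j]) j h2]
        simp only [mergecheckRow]
        rw [if_neg (by simp [hj])]

lemma row_eq (row : List Int) :
    mergecheckRow none row = ((compress row).length != row.length) := by
  cases row with
  | nil => rfl
  | cons j rest =>
      have hstep : compressStep [] j = [j] := by unfold compressStep; simp
      have hk := compress_key rest [j] j (by simp)
      have hfirst : mergecheckRow none (j :: rest) = mergecheckRow (some j) rest := by
        simp [mergecheckRow]
      simp only [compress, List.foldl_cons, hstep]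
      rw [hfirst]
      cases hmr : mergecheckRow (some j) rest with
      | false =>
          have h3 : (List.foldl compressStep [j] rest).length = rest.length + 1 := by
            have := hk.mpr hmr; simp at this; omega
          simp [h3]
      | true =>
          have hne : (List.foldl compressStep [j] rest).length ≠ [j].length + rest.length := by
            intro he
            have := hk.mp he
            simp [hmr] at this
          simp at hne
          simp only [List.length_cons]
          symm
          simp only [bne_iff_ne, ne_eq]
          omega

lemma mergecheckLoop_eq (grid : List (List Int)) (c : Bool) :
    mergecheckLoop grid c = (c || grid.any (fun row => mergecheckRow none row)) := by
  induction grid generalizing c with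
  | nil => simp [mergecheckLoop]
  | cons i rest ih =>
      cases c with
      | true => simp [mergecheckLoop]
      | false => simp [mergecheckLoop, ih]

-- ===== VERDICT (by name: the statement is the Claim_ definition above) =====
theorem mergecheck_spec : Claim_equal_mergecheck := by
  intro grid _
  unfold Spec_mergecheck mergecheck mergecheck_alt
  rw [mergecheckLoop_eq]
  simp [row_eq]
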